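-- pv_equiv track=rewrite | github.com/geoplusplus/lcmap-ccdc | firebird/driver.py | to_pyccd
-- ===== SOURCE A (Python) =====
-- from functools import partial
--
-- def to_pyccd(located_rods_by_spectra, dates):
--     """Organizes rods by xy instead of by spectrum
--     :param located_rods_by_spectra: dict of dicts, keyed first by spectra
--                                     then by coordinate
--     :returns: Generated tuple of tuples
--     :example:
--     located_rods_by_spectra parameter:
--     {'red':   {(0, 0): [110, 110, 234, 664], (0, 1): [23, 887, 110, 111]}}
--     {'green': {(0, 0): [120, 112, 224, 624], (0, 1): [33, 387, 310, 511]}}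
--     {'blue':  {(0, 0): [128, 412, 244, 654], (0, 1): [73, 987, 119, 191]}}
--     ...
--
--     returns:
--     (((0, 0): {'red':   [110, 110, 234, 664],
--                'green': [120, 112, 224, 624],
--                'blue':  [128, 412, 244, 654], ... },
--       (0, 1): {'red':   [23, 887, 110, 111],
--                'green': [33, 387, 310, 511],
--                'blue':  [73, 987, 119, 191], ...}))
--     ...
--     """
--     def colors(spectra, rods, xy):
--         return {spec: rods[spec][xy] for spec in spectra}
--
--     def add_dates(rainbow, dates):
--         rainbow['dates'] = dates
--         return rainbow
--
--     # alias the descriptive name down to something that doesn't take up a line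
--     locrods   = located_rods_by_spectra
--     spectra   = tuple(locrods.keys())
--     locations = locrods[spectra[0]].keys()
--     rainbow   = partial(colors, spectra=locrods.keys(), rods=locrods)
--     return tuple((xy, add_dates(rainbow(xy=xy), dates)) for xy in locations)
-- ===== SOURCE B (Python) =====
-- def to_pyccd(located_rods_by_spectra, dates):
--     # Scatter: iterate each spectrum's own items into a per-coordinate accumulator
--     first = next(iter(located_rods_by_spectra.values()))
--     acc = {xy: {} for xy in first}
--     for spec, rods in located_rods_by_spectra.items():
--         for xy, rod in rods.items():
--             if xy in acc:
--                 acc[xy][spec] = rod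
--     return tuple((xy, d | {'dates': dates}) for xy, d in acc.items())
-- ===== Notes on version B (the rewrite author's own statement) =====
-- stated objective: alternative
-- what changed: Replaces A's gather (for each coordinate of the first spectrum, a dict comprehension that looks every spectrum up by key) with a scatter: initialize an accumulator keyed by the first spectrum's coordinates, then stream every spectrum's own items once into it, guarded by membership, and tack 'dates' on while emitting.
-- outside the precondition, e.g. on to_pyccd({}, [1]): A raises IndexError, B raises StopIteration
import Mathlib
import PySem

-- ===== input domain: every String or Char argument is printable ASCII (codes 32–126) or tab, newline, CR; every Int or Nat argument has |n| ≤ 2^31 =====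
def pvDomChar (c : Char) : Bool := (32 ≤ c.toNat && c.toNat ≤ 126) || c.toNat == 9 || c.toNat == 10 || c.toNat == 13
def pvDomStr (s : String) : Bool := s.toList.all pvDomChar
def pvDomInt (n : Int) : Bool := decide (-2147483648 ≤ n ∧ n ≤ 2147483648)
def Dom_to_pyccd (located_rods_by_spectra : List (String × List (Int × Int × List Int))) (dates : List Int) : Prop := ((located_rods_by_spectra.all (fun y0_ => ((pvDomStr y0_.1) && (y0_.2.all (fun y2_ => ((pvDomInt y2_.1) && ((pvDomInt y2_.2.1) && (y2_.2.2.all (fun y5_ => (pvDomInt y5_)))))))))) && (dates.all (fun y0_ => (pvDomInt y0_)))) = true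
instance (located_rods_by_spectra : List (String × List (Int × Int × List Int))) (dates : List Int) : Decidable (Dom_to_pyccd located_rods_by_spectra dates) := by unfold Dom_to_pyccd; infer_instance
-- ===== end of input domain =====

-- B scatters each spectrum's own items into a per-coordinate accumulator instead of
-- gathering per coordinate by repeated nested dict lookups (objective: alternative decomposition).

-- Shared encoding of the dict-of-dicts argument (both Pythons RECEIVE it as a dict):
-- the outer and inner association lists read with Python dict semantics (later value wins).
def pvLocrods (located_rods_by_spectra : List (String × List (Int × Int × List Int))) :
    PySem.Dict String (PySem.Dict (Int × Int) (List Int)) :=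
  PySem.Dict.ofList (located_rods_by_spectra.map
    (fun p => (p.1, PySem.Dict.ofList (p.2.map (fun q => ((q.1, q.2.1), q.2.2))))))

-- ===== PORT A =====
-- colors: {spec: rods[spec][xy] for spec in spectra}; a missing xy is a KeyError
-- (the 'none' skip is unreachable under Pre_, which excludes exactly those inputs)
def pvColors (spectra : List String) (rods : PySem.Dict String (PySem.Dict (Int × Int) (List Int)))
    (xy : Int × Int) : PySem.Dict String (List Int) :=
  spectra.foldl
    (fun d spec =>
      match (rods.getD spec PySem.Dict.empty).get? xy with
      | some v => d.insert spec v
      | none => d) PySem.Dict.empty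

-- add_dates: rainbow['dates'] = dates
def pvAddDates (rainbow : PySem.Dict String (List Int)) (dates : List Int) : PySem.Dict String (List Int) :=
  rainbow.insert "dates" dates

def to_pyccd (located_rods_by_spectra : List (String × List (Int × Int × List Int))) (dates : List Int) : List ((Int × Int) × (List (String × List Int))) :=
  match PySem.List.pyGet? (pvLocrods located_rods_by_spectra).keys 0 with
  | none => []  -- spectra[0] on an empty dict: IndexError; excluded by Pre_
  | some s0 =>
    ((pvLocrods located_rods_by_spectra).getD s0 PySem.Dict.empty).keys.map
      (fun xy =>
        (xy, (pvAddDates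
                (pvColors (pvLocrods located_rods_by_spectra).keys
                          (pvLocrods located_rods_by_spectra) xy) dates).items))

-- ===== PORT B =====
-- acc = {xy: {} for xy in first}
def pvInit (ks : List (Int × Int)) : PySem.Dict (Int × Int) (PySem.Dict String (List Int)) :=
  ks.foldl (fun a xy => a.insert xy PySem.Dict.empty) PySem.Dict.empty

-- body of the inner loop: if xy in acc: acc[xy][spec] = rod
def pvScatInner (spec : String) (a : PySem.Dict (Int × Int) (PySem.Dict String (List Int)))
    (q : (Int × Int) × List Int) : PySem.Dict (Int × Int) (PySem.Dict String (List Int)) :=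
  if a.contains q.1 then a.insert q.1 ((a.getD q.1 PySem.Dict.empty).insert spec q.2) else a

-- for spec, rods in located_rods_by_spectra.items(): for xy, rod in rods.items(): …
def pvScatter (L : List (String × PySem.Dict (Int × Int) (List Int)))
    (a : PySem.Dict (Int × Int) (PySem.Dict String (List Int))) :
    PySem.Dict (Int × Int) (PySem.Dict String (List Int)) :=
  L.foldl (fun a p => p.2.items.foldl (pvScatInner p.1) a) a

def to_pyccd_alt (located_rods_by_spectra : List (String × List (Int × Int × List Int))) (dates : List Int) : List ((Int × Int) × (List (String × List Int))) :=
  match (pvLocrods located_rods_by_spectra).items with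
  | [] => []  -- next(iter(...)) on an empty dict: StopIteration; excluded by Pre_
  | (_, first) :: _ =>
    (pvScatter (pvLocrods located_rods_by_spectra).items (pvInit first.keys)).items.map
      (fun p => (p.1, (p.2.insert "dates" dates).items))

-- ===== PRECONDITION & SPEC =====
-- Pre_ excludes exactly the inputs where the Python A raises: the empty dict (IndexError on
-- spectra[0]) and dicts where some coordinate of the first spectrum is missing from another
-- spectrum (KeyError in the colors comprehension). A returns on every other input.
def Pre_to_pyccd (located_rods_by_spectra : List (String × List (Int × Int × List Int))) (dates : List Int) : Prop :=
  located_rods_by_spectra ≠ [] ∧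
  ∀ s0 ∈ PySem.List.pyGet? (pvLocrods located_rods_by_spectra).keys 0,
    ∀ xy ∈ ((pvLocrods located_rods_by_spectra).getD s0 PySem.Dict.empty).keys,
      ∀ spec ∈ (pvLocrods located_rods_by_spectra).keys,
        ((pvLocrods located_rods_by_spectra).getD spec PySem.Dict.empty).contains xy = true
instance (located_rods_by_spectra : List (String × List (Int × Int × List Int))) (dates : List Int) : Decidable (Pre_to_pyccd located_rods_by_spectra dates) := by unfold Pre_to_pyccd; infer_instance

def pvWitness_to_pyccd : (List (String × List (Int × Int × List Int))) × List Int :=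
  ([("red", [((0 : Int), (0 : Int), [(1 : Int)]), (0, 1, [2])]),
    ("green", [((0 : Int), (0 : Int), [(3 : Int)]), (0, 1, [4])])], [5, 6])

def Spec_to_pyccd (located_rods_by_spectra : List (String × List (Int × Int × List Int))) (dates : List Int) (out : List ((Int × Int) × (List (String × List Int)))) : Prop := out = to_pyccd_alt located_rods_by_spectra dates
instance (located_rods_by_spectra : List (String × List (Int × Int × List Int))) (dates : List Int) (out : List ((Int × Int) × (List (String × List Int)))) : Decidable (Spec_to_pyccd located_rods_by_spectra dates out) := by unfold Spec_to_pyccd; infer_instance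

-- ===== CLAIM (what is proved, stated in full; the proofs are below) =====
def Claim_equal_to_pyccd : Prop := ∀ (located_rods_by_spectra : List (String × List (Int × Int × List Int))) (dates : List Int), Dom_to_pyccd located_rods_by_spectra dates → Pre_to_pyccd located_rods_by_spectra dates → Spec_to_pyccd located_rods_by_spectra dates (to_pyccd located_rods_by_spectra dates)

-- ===== LEMMAS AND PROOFS =====

-- every value stored in d.update ps comes from d or from ps
theorem pv_mem_values_update {κ ν : Type} [BEq κ] [LawfulBEq κ] (ps : List (κ × ν))
    (d : PySem.Dict κ ν) (v : ν) (h : v ∈ (d.update ps).values) :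
    v ∈ d.values ∨ v ∈ ps.map Prod.snd := by
  induction ps generalizing d with
  | nil => exact Or.inl h
  | cons p ps ih =>
    simp only [PySem.Dict.update, List.foldl_cons] at h
    rcases ih (d.insert p.1 p.2) (by simpa [PySem.Dict.update] using h) with h' | h'
    · rcases PySem.Dict.mem_values_insert d p.1 p.2 v h' with h'' | h''
      · exact Or.inr (by simp [h''])
      · exact Or.inl h''
    · exact Or.inr (by simp [List.map_cons]; right; simpa using h')

-- every inner dict stored in pvLocrods has Nodup keys
theorem pv_rods_nodup (l : List (String × List (Int × Int × List Int)))
    (p : String × PySem.Dict (Int × Int) (List Int)) (hp : p ∈ (pvLocrods l).items) :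
    p.2.keys.Nodup := by
  have hv : p.2 ∈ (pvLocrods l).values := by
    simp only [PySem.Dict.values]
    exact List.mem_map_of_mem hp
  unfold pvLocrods PySem.Dict.ofList at hv
  rcases pv_mem_values_update _ _ _ hv with h | h
  · simp [PySem.Dict.values, PySem.Dict.empty] at h
  · simp only [List.map_map, List.mem_map] at h
    obtain ⟨q, _, hq⟩ := h
    rw [← hq]
    exact PySem.Dict.nodup_keys_ofList _

-- the scatter inner loop never changes which coordinates are present
theorem pv_scat_contains (spec : String) (items : List ((Int × Int) × List Int))
    (a : PySem.Dict (Int × Int) (PySem.Dict String (List Int))) (z : Int × Int) :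
    (items.foldl (pvScatInner spec) a).contains z = a.contains z := by
  induction items generalizing a with
  | nil => rfl
  | cons q items ih =>
    rw [List.foldl_cons, ih]
    unfold pvScatInner
    by_cases h : a.contains q.1
    · simp only [h, if_true, PySem.Dict.contains_insert]
      by_cases hz : z = q.1
      · subst hz; simp [h]
      · simp [hz]
    · simp [h]

theorem pv_scat_keys (spec : String) (items : List ((Int × Int) × List Int))
    (a : PySem.Dict (Int × Int) (PySem.Dict String (List Int))) :
    (items.foldl (pvScatInner spec) a).keys = a.keys := by
  induction items generalizing a with
  | nil => rfl
  | cons q items ih =>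
    rw [List.foldl_cons, ih]
    unfold pvScatInner
    by_cases h : a.contains q.1
    · simp only [h, if_true]
      exact PySem.Dict.keys_insert_of_contains a _ h
    · simp [h]

-- value at a present coordinate xy after the inner loop over one spectrum's items
theorem pv_scat_getD (spec : String) (xy : Int × Int) (items : List ((Int × Int) × List Int))
    (a : PySem.Dict (Int × Int) (PySem.Dict String (List Int))) (h : a.contains xy = true) :
    (items.foldl (pvScatInner spec) a).getD xy PySem.Dict.empty
      = items.foldl (fun d q => if q.1 = xy then d.insert spec q.2 else d)
          (a.getD xy PySem.Dict.empty) := by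
  induction items generalizing a with
  | nil => rfl
  | cons q items ih =>
    rw [List.foldl_cons, List.foldl_cons]
    by_cases hq : q.1 = xy
    · have ha : a.contains q.1 = true := by rw [hq]; exact h
      have hstep : pvScatInner spec a q
          = a.insert q.1 ((a.getD q.1 PySem.Dict.empty).insert spec q.2) := by
        rw [pvScatInner, if_pos ha]
      rw [hstep, hq, ih _ (by simp)]
      simp
    · have hcont : (pvScatInner spec a q).contains xy = true := by
        unfold pvScatInner
        by_cases ha : a.contains q.1
        · simp [ha, PySem.Dict.contains_insert, h]
        · simp [ha, h]
      rw [ih _ hcont]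
      have : (pvScatInner spec a q).getD xy PySem.Dict.empty = a.getD xy PySem.Dict.empty := by
        unfold pvScatInner
        by_cases ha : a.contains q.1
        · rw [if_pos ha, PySem.Dict.getD_insert,
              if_neg (fun h' : xy = q.1 => hq h'.symm)]
        · rw [if_neg ha]
      rw [this, if_neg hq]

-- a fold hitting no matching key is the identity
theorem pv_fold_none (spec : String) (xy : Int × Int) (items : List ((Int × Int) × List Int))
    (d0 : PySem.Dict String (List Int)) (h : ∀ r ∈ items, r.1 ≠ xy) :
    items.foldl (fun d q => if q.1 = xy then d.insert spec q.2 else d) d0 = d0 := by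
  induction items generalizing d0 with
  | nil => rfl
  | cons q items ih =>
    rw [List.foldl_cons]
    have hq : q.1 ≠ xy := h q (List.mem_cons_self ..)
    simp only [hq, if_false]
    exact ih d0 (fun r hr => h r (List.mem_cons_of_mem _ hr))

-- folding one spectrum's items at coordinate xy is a single dict lookup
theorem pv_fold_lookup (spec : String) (xy : Int × Int)
    (r : PySem.Dict (Int × Int) (List Int)) (d0 : PySem.Dict String (List Int))
    (hnd : r.keys.Nodup) :
    r.items.foldl (fun d q => if q.1 = xy then d.insert spec q.2 else d) d0
      = match r.get? xy with
        | some v => d0.insert spec v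
        | none => d0 := by
  obtain ⟨items⟩ := r
  simp only [PySem.Dict.keys] at hnd
  induction items generalizing d0 with
  | nil => rfl
  | cons q items ih =>
    rw [show (PySem.Dict.mk (q :: items)).items = q :: items from rfl, List.foldl_cons,
        show (PySem.Dict.mk (q :: items)) = PySem.Dict.mk ((q.1, q.2) :: items) from rfl,
        PySem.Dict.get?_mk_cons]
    simp only [List.map_cons, List.nodup_cons] at hnd
    by_cases hq : q.1 = xy
    · have hnotin : ∀ r ∈ items, r.1 ≠ xy := by
        intro r hr hxy
        exact hnd.1 (hq ▸ hxy ▸ List.mem_map_of_mem hr)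
      simp only [beq_iff_eq, hq, if_true]
      exact pv_fold_none spec xy items _ hnotin
    · simp only [beq_iff_eq, hq, if_false]
      rw [ih d0 hnd.2]

-- the whole scatter, read at one present coordinate, is A's gather at that coordinate
theorem pv_scat_outer (L : List (String × PySem.Dict (Int × Int) (List Int)))
    (a : PySem.Dict (Int × Int) (PySem.Dict String (List Int))) (xy : Int × Int)
    (h : a.contains xy = true) (hnd : ∀ p ∈ L, p.2.keys.Nodup) :
    (pvScatter L a).getD xy PySem.Dict.empty
      = L.foldl
          (fun d p =>
            match p.2.get? xy with
            | some v => d.insert p.1 v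
            | none => d) (a.getD xy PySem.Dict.empty) := by
  induction L generalizing a with
  | nil => rfl
  | cons p L ih =>
    unfold pvScatter at *
    rw [List.foldl_cons, List.foldl_cons]
    have hcont : (p.2.items.foldl (pvScatInner p.1) a).contains xy = true := by
      rw [pv_scat_contains]; exact h
    rw [ih _ hcont (fun q hq => hnd q (List.mem_cons_of_mem _ hq))]
    rw [pv_scat_getD _ _ _ _ h, pv_fold_lookup _ _ _ _ (hnd p (List.mem_cons_self ..))]

theorem pv_scatter_keys (L : List (String × PySem.Dict (Int × Int) (List Int)))
    (a : PySem.Dict (Int × Int) (PySem.Dict String (List Int))) :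
    (pvScatter L a).keys = a.keys := by
  induction L generalizing a with
  | nil => rfl
  | cons p L ih =>
    unfold pvScatter at *
    rw [List.foldl_cons, ih, pv_scat_keys]

-- an update never empties a nonempty dict
theorem pv_update_ne_nil {κ ν : Type} [BEq κ] (ps : List (κ × ν)) (d : PySem.Dict κ ν)
    (h : d.items ≠ []) : (d.update ps).items ≠ [] := by
  induction ps generalizing d with
  | nil => exact h
  | cons p ps ih =>
    simp only [PySem.Dict.update, List.foldl_cons] at *
    apply ih
    unfold PySem.Dict.insert
    by_cases hc : d.contains p.1
    · simpa [hc] using h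
    · simp [hc]

theorem pv_locrods_ne_nil (l : List (String × List (Int × Int × List Int))) (hne : l ≠ []) :
    (pvLocrods l).items ≠ [] := by
  obtain ⟨p, tl, rfl⟩ := List.exists_cons_of_ne_nil hne
  unfold pvLocrods PySem.Dict.ofList
  rw [List.map_cons]
  simp only [PySem.Dict.update, List.foldl_cons]
  have : ((PySem.Dict.empty : PySem.Dict String (PySem.Dict (Int × Int) (List Int))).insert
      p.1 (PySem.Dict.ofList (p.2.map (fun q => ((q.1, q.2.1), q.2.2))))).items ≠ [] := by
    simp [PySem.Dict.insert, PySem.Dict.empty, PySem.Dict.contains]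
  exact pv_update_ne_nil _ _ this

theorem pv_main (l : List (String × List (Int × Int × List Int))) (dates : List Int)
    (hne : l ≠ []) : to_pyccd l dates = to_pyccd_alt l dates := by
  obtain ⟨⟨s0, first⟩, rest, hitems⟩ : ∃ p rest, (pvLocrods l).items = p :: rest := by
    cases hi : (pvLocrods l).items with
    | nil => exact absurd hi (pv_locrods_ne_nil l hne)
    | cons p rest => exact ⟨p, rest, rfl⟩
  have hkeys : (pvLocrods l).keys = s0 :: rest.map (fun p => p.1) := by
    simp [PySem.Dict.keys, hitems]
  have hget0 : PySem.List.pyGet? (pvLocrods l).keys 0 = some s0 := by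
    rw [hkeys]; simp [PySem.List.pyGet?, PySem.List.pyIdx?]
  have hfirst : (pvLocrods l).getD s0 PySem.Dict.empty = first := by
    simp [PySem.Dict.getD, PySem.Dict.get?, hitems]
  have hnodupLR : (pvLocrods l).keys.Nodup := PySem.Dict.nodup_keys_ofList _
  have hfkn : first.keys.Nodup :=
    pv_rods_nodup l (s0, first) (by rw [hitems]; exact List.mem_cons_self ..)
  have hacc0items : (pvInit first.keys).items
      = first.keys.map (fun xy => (xy, (PySem.Dict.empty : PySem.Dict String (List Int)))) := by
    unfold pvInit
    have := PySem.Dict.items_foldl_insert_fresh first.keys (fun xy => xy)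
      (fun _ => (PySem.Dict.empty : PySem.Dict String (List Int))) PySem.Dict.empty
      (fun a _ => by simp [PySem.Dict.contains, PySem.Dict.empty])
      (by simpa using hfkn)
    simpa [PySem.Dict.empty] using this
  have hacc0keys : (pvInit first.keys).keys = first.keys := by
    show List.map (fun x => x.1) (pvInit first.keys).items = first.keys
    rw [hacc0items, List.map_map]
    simp [Function.comp_def]
  have hacckeys : (pvScatter ((s0, first) :: rest) (pvInit first.keys)).keys = first.keys := by
    rw [pv_scatter_keys, hacc0keys]
  have hitems_map : (pvLocrods l).items
      = (pvLocrods l).keys.map (fun k => (k, (pvLocrods l).getD k PySem.Dict.empty)) :=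
    PySem.Dict.items_eq_map_keys _ hnodupLR _
  have hval : ∀ xy ∈ first.keys,
      (pvScatter ((s0, first) :: rest) (pvInit first.keys)).getD xy PySem.Dict.empty
        = pvColors (pvLocrods l).keys (pvLocrods l) xy := by
    intro xy hxy
    have hc0 : (pvInit first.keys).contains xy = true :=
      (PySem.Dict.contains_iff_mem_keys _ _).mpr (by rw [hacc0keys]; exact hxy)
    have hg0 : (pvInit first.keys).getD xy PySem.Dict.empty = PySem.Dict.empty :=
      PySem.Dict.getD_of_mem_items _ (by rw [hacc0items]; exact List.mem_map_of_mem hxy)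
        (by rw [hacc0keys]; exact hfkn) _
    rw [pv_scat_outer _ _ _ hc0 (fun p hp => pv_rods_nodup l p (hitems ▸ hp)), hg0,
        ← hitems, hitems_map, List.foldl_map]
    rfl
  unfold to_pyccd to_pyccd_alt
  simp only [hget0, hitems, hfirst]
  rw [PySem.Dict.items_eq_map_keys _ (by rw [hacckeys]; exact hfkn) PySem.Dict.empty, hacckeys,
      List.map_map]
  exact List.map_congr_left (fun xy hxy => by
    simp only [Function.comp, pvAddDates]
    rw [hval xy hxy])

-- ===== VERDICT (by name: the statement is the Claim_ definition above) =====
theorem to_pyccd_spec : Claim_equal_to_pyccd := by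
  intro l dates _ hpre
  unfold Spec_to_pyccd
  exact pv_main l dates hpre.1
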